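-- pv_equiv track=rewrite | github.com/kevin-quiroz/Sintaxis | AguAFD.py | automataOprel
-- ===== SOURCE A (Python) =====
-- ESTADO_FINAL = "ESTADO FINAL"
--
-- ESTADO_NO_FINAL = "NO ACEPTADO"
--
-- ESTADO_TRAMPA = "EN ESTADO TRAMPA"
--
-- def automataOprel(lexema):
--     estado = 0
--     estadoFinal = [1, 3]
--     for caracter in lexema:
--         if estado == 0 and caracter == ">":
--             estado = 1
--         elif estado == 0 and caracter == "<":
--             estado = 1
--         elif estado == 0 and caracter == "=":
--             estado = 3
--         elif estado == 1 and caracter == "=":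
--             estado = 3
--         elif estado == 0 and caracter == "!":
--             estado = 2
--         elif estado == 2 and caracter == "=":
--             estado = 3
--         else:
--             estado = -1
--             break
--     if estado == -1:
--         return ESTADO_TRAMPA
--     elif estado in estadoFinal:
--         return ESTADO_FINAL
--     else:
--         return ESTADO_NO_FINAL
-- ===== SOURCE B (Python) =====
-- def automataOprel(lexema):
--     # The DFA has no cycles, so its non-trap language is finite:
--     # accepted words are exactly the six relational operators, and only
--     # "" and "!" stop in a non-final non-trap state. Everything else traps.
--     if lexema in (">", "<", "=", ">=", "<=", "!="):
--         return "ESTADO FINAL"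
--     if lexema in ("", "!"):
--         return "NO ACEPTADO"
--     return "EN ESTADO TRAMPA"
-- ===== Notes on version B (the rewrite author's own statement) =====
-- stated objective: simpler
-- what changed: The acyclic DFA's non-trap language is finite, so B replaces the state-machine loop entirely by a membership test against the six operator strings (accept) and the two non-final prefixes "" and "!" (reject), trap otherwise.
import Mathlib
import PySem

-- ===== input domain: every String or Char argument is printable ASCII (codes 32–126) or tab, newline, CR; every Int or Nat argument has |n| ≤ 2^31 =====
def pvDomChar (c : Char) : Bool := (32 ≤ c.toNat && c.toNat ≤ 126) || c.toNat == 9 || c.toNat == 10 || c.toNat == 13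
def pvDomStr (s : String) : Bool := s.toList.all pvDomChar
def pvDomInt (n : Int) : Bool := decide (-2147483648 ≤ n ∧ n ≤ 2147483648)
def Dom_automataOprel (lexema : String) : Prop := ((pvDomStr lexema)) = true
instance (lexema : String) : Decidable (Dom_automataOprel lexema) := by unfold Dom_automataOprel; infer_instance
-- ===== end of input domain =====

-- B exploits that the acyclic DFA's non-trap language is finite: a plain membership
-- test against the six operators / the two non-final prefixes replaces the state loop.

-- ===== PORT A =====
-- the loop body of A: one step of the branch cascade plus the '-1 → break' early exit
def automataOprelLoop : Int → List Char → Int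
  | estado, [] => estado
  | estado, caracter :: rest =>
    if estado = 0 ∧ caracter = '>' then automataOprelLoop 1 rest
    else if estado = 0 ∧ caracter = '<' then automataOprelLoop 1 rest
    else if estado = 0 ∧ caracter = '=' then automataOprelLoop 3 rest
    else if estado = 1 ∧ caracter = '=' then automataOprelLoop 3 rest
    else if estado = 0 ∧ caracter = '!' then automataOprelLoop 2 rest
    else if estado = 2 ∧ caracter = '=' then automataOprelLoop 3 rest
    else (-1 : Int)   -- estado = -1; break

def automataOprel (lexema : String) : String :=
  let estadoFinal : List Int := [1, 3]
  let estado := automataOprelLoop 0 lexema.toList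
  if estado = -1 then "EN ESTADO TRAMPA"
  else if estado ∈ estadoFinal then "ESTADO FINAL"
  else "NO ACEPTADO"

-- ===== PORT B =====
def automataOprel_alt (lexema : String) : String :=
  if lexema = ">" ∨ lexema = "<" ∨ lexema = "=" ∨ lexema = ">=" ∨ lexema = "<=" ∨ lexema = "!=" then
    "ESTADO FINAL"
  else if lexema = "" ∨ lexema = "!" then
    "NO ACEPTADO"
  else
    "EN ESTADO TRAMPA"

-- ===== PRECONDITION & SPEC =====
def Spec_automataOprel (lexema : String) (out : String) : Prop := out = automataOprel_alt lexema
instance (lexema : String) (out : String) : Decidable (Spec_automataOprel lexema out) := by unfold Spec_automataOprel; infer_instance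

-- ===== CLAIM (what is proved, stated in full; the proofs are below) =====
def Claim_equal_automataOprel : Prop := ∀ (lexema : String), Dom_automataOprel lexema → Spec_automataOprel lexema (automataOprel lexema)

-- ===== LEMMAS AND PROOFS =====
theorem string_eq_iff_toList (s : String) (t : String) : s = t ↔ s.toList = t.toList := by
  constructor
  · intro h; rw [h]
  · intro h; exact String.ext (by simpa [String.toList] using h)

theorem loop_from3 (cs : List Char) (h : cs ≠ []) : automataOprelLoop 3 cs = -1 := by
  cases cs with
  | nil => exact absurd rfl h
  | cons c rest => simp [automataOprelLoop]

theorem loop_from1 (cs : List Char) :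
    automataOprelLoop 1 cs = if cs = [] then 1 else if cs = ['='] then 3 else -1 := by
  cases cs with
  | nil => simp [automataOprelLoop]
  | cons c rest =>
    by_cases hc : c = '='
    · subst hc
      cases rest with
      | nil => simp [automataOprelLoop]
      | cons d r => simp [automataOprelLoop]
    · simp [automataOprelLoop, hc]

theorem loop_from2 (cs : List Char) :
    automataOprelLoop 2 cs = if cs = [] then 2 else if cs = ['='] then 3 else -1 := by
  cases cs with
  | nil => simp [automataOprelLoop]
  | cons c rest =>
    by_cases hc : c = '='
    · subst hc
      cases rest with
      | nil => simp [automataOprelLoop]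
      | cons d r => simp [automataOprelLoop]
    · simp [automataOprelLoop, hc]

-- ===== VERDICT (by name: the statement is the Claim_ definition above) =====
theorem automataOprel_spec : Claim_equal_automataOprel := by
  intro lexema _
  unfold Spec_automataOprel automataOprel automataOprel_alt
  simp only [string_eq_iff_toList]
  cases hcs : lexema.toList with
  | nil => simp [automataOprelLoop]
  | cons c rest =>
    by_cases h1 : c = '>' <;> by_cases h2 : c = '<' <;> by_cases h3 : c = '=' <;> by_cases h4 : c = '!'
    all_goals subst_vars
    all_goals simp_all [automataOprelLoop, loop_from1, loop_from2]
    all_goals try (rcases rest with _ | ⟨d, r⟩ <;> simp_all [loop_from3, automataOprelLoop] <;> split_ifs <;> simp_all [automataOprelLoop])
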